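-- pv_equiv track=rewrite | github.com/jyshtty/Scaler_DSA_intermidiate | 20_problem_solving_3/assignment/sum_the_difference.py | solve
-- ===== SOURCE A (Python) =====
-- def solve(arr):
--     MOD = 1000000007;
--     n = len(arr)
--
-- # function for sum of max min difference
--     # sort all numbers
--     arr.sort()
--
--     # iterate over array and with help of
--     # horner's rule calc max_sum and min_sum
--     min_sum = 0
--     max_sum = 0
--     for i in range(0, n):
--         max_sum = 2 * max_sum + arr[n - 1 - i];
--         max_sum %= MOD;
--         min_sum = 2 * min_sum + arr[i];
--         min_sum %= MOD;
--
--     return (max_sum - min_sum + MOD) % MOD;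
-- ===== SOURCE B (Python) =====
-- def solve(arr):
--     MOD = 1000000007
--     arr.sort()
--     n = len(arr)
--     if n == 0:
--         return 0
--     # weight table: pow2[k] = 2**k % MOD
--     pow2 = [1]
--     p = 1
--     for _ in range(1, n):
--         p = p * 2 % MOD
--         pow2.append(p)
--     total = 0
--     for i in range(n):
--         total = (total + arr[i] * (pow2[i] - pow2[n - 1 - i])) % MOD
--     return total % MOD
-- ===== Notes on version B (the rewrite author's own statement) =====
-- stated objective: alternative
-- what changed: A's two interleaved Horner accumulators (doubling and reducing mod p at every step, once from each end of the sorted array) are replaced by building a table of powers 2^k mod p in one pass and then accumulating the single weighted sum of arr[i]*(pow2[i]-pow2[n-1-i]) in a second pass.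
import Mathlib
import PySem

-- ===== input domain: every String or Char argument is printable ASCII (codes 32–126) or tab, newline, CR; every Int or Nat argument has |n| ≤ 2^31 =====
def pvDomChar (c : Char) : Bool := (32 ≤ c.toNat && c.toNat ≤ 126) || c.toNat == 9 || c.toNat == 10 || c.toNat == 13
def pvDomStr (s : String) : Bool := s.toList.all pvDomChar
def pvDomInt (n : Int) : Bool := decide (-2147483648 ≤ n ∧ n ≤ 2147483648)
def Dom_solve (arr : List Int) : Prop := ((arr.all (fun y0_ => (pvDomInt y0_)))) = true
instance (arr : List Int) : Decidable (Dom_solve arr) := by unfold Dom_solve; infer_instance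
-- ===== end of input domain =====

-- B replaces A's two interleaved Horner accumulators by a precomputed 2^k mod p weight
-- table and one weighted-sum pass (objective: alternative decomposition, similar cost).
-- Both A and B sort their argument in place; the equivalence proved here is about the
-- return value.

-- ===== PORT A =====
-- indices i and n - 1 - i into s are always in range here, so pyGetD is exact
def solve (arr : List Int) : Int :=
  let MOD : Int := 1000000007
  let s := PySem.List.sorted arr (fun x => x)
  let n := s.length
  let st := (PySem.List.pyRange 0 (n : Int)).foldl
    (fun (p : Int × Int) i =>
      (PySem.Int.mod (2 * p.1 + PySem.List.pyGetD s i 0) MOD,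
       PySem.Int.mod (2 * p.2 + PySem.List.pyGetD s ((n : Int) - 1 - i) 0) MOD))
    (0, 0)
  PySem.Int.mod (st.2 - st.1 + MOD) MOD

-- ===== PORT B =====
-- indices i and n - 1 - i into s and pow2 are always in range, so pyGetD is exact
def solve_alt (arr : List Int) : Int :=
  let MOD : Int := 1000000007
  let s := PySem.List.sorted arr (fun x => x)
  let n := s.length
  if n = 0 then 0
  else
    let pw := (PySem.List.pyRange 1 (n : Int)).foldl
      (fun (st : List Int × Int) _ =>
        let p := PySem.Int.mod (st.2 * 2) MOD
        (st.1 ++ [p], p))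
      ([1], 1)
    let pow2 := pw.1
    let total := (PySem.List.pyRange 0 (n : Int)).foldl
      (fun total i =>
        PySem.Int.mod
          (total + PySem.List.pyGetD s i 0 *
            (PySem.List.pyGetD pow2 i 0 - PySem.List.pyGetD pow2 ((n : Int) - 1 - i) 0))
          MOD)
      0
    PySem.Int.mod total MOD

-- ===== PRECONDITION & SPEC =====
def Spec_solve (arr : List Int) (out : Int) : Prop := out = solve_alt arr
instance (arr : List Int) (out : Int) : Decidable (Spec_solve arr out) := by unfold Spec_solve; infer_instance

-- ===== CLAIM (what is proved, stated in full; the proofs are below) =====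
def Claim_equal_solve : Prop := ∀ (arr : List Int), Dom_solve arr → Spec_solve arr (solve arr)

-- ===== LEMMAS AND PROOFS =====

theorem pv_horner_mod (M : Int) (f : Nat → Int) (k : Nat) :
    (List.range k).foldl (fun a j => (2 * a + f j) % M) 0
      = ((List.range k).foldl (fun a j => 2 * a + f j) 0) % M := by
  induction k with
  | zero => simp
  | succ k ih =>
      simp only [List.range_succ, List.foldl_append, List.foldl_cons, List.foldl_nil, ih]
      exact (Int.ModEq.add_right (f k) (Int.ModEq.mul_left 2
        (Int.emod_emod_of_dvd _ dvd_rfl)))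

theorem pv_horner_closed (f : Nat → Int) (k : Nat) :
    (List.range k).foldl (fun a j => 2 * a + f j) 0
      = ∑ j ∈ Finset.range k, f j * 2 ^ (k - 1 - j) := by
  induction k with
  | zero => simp
  | succ k ih =>
      simp only [List.range_succ, List.foldl_append, List.foldl_cons, List.foldl_nil, ih]
      rw [Finset.sum_range_succ, Finset.mul_sum]
      have h1 : ∀ j ∈ Finset.range k,
          2 * (f j * 2 ^ (k - 1 - j)) = f j * 2 ^ (k + 1 - 1 - j) := by
        intro j hj
        have hj' := Finset.mem_range.mp hj
        have : k + 1 - 1 - j = (k - 1 - j) + 1 := by omega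
        rw [this, pow_succ]; ring
      rw [Finset.sum_congr rfl h1]
      have : k + 1 - 1 - k = 0 := by omega
      rw [this]; ring

theorem pv_addfold_mod (M : Int) (g : Nat → Int) (k : Nat) :
    (List.range k).foldl (fun a j => (a + g j) % M) 0
      = (∑ j ∈ Finset.range k, g j) % M := by
  induction k with
  | zero => simp
  | succ k ih =>
      simp only [List.range_succ, List.foldl_append, List.foldl_cons, List.foldl_nil, ih,
        Finset.sum_range_succ]
      exact Int.ModEq.add_right (g k) (Int.emod_emod_of_dvd _ dvd_rfl)

theorem pv_powtable (n : Nat) (hn : 1 ≤ n) :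
    (PySem.List.pyRange 1 (n : Int)).foldl
      (fun (st : List Int × Int) _ =>
        let p := PySem.Int.mod (st.2 * 2) 1000000007
        (st.1 ++ [p], p))
      ([1], 1)
    = ((List.range n).map (fun k => (2 : Int) ^ k % 1000000007),
       (2 : Int) ^ (n - 1) % 1000000007) := by
  induction n with
  | zero => omega
  | succ n ih =>
      rcases Nat.eq_or_lt_of_le hn with h1 | h1
      · have : n = 0 := by omega
        subst this
        norm_num [PySem.List.pyRange]
      · have hn1 : 1 ≤ n := by omega
        have hcast : ((n + 1 : Nat) : Int) = (n : Int) + 1 := by push_cast; ring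
        have hle : (1 : Int) ≤ (n : Int) := by exact_mod_cast hn1
        rw [hcast, PySem.List.pyRange_one_succ_right hle, List.foldl_append, ih hn1]
        simp only [List.foldl_cons, List.foldl_nil]
        have hmod : PySem.Int.mod ((2 : Int) ^ (n - 1) % 1000000007 * 2) 1000000007
            = (2 : Int) ^ n % 1000000007 := by
          rw [PySem.Int.mod_eq_emod_of_pos (by norm_num)]
          have : (2 : Int) ^ (n - 1) % 1000000007 * 2 % 1000000007
              = (2 : Int) ^ (n - 1) * 2 % 1000000007 :=
            Int.ModEq.mul_right 2 (Int.emod_emod_of_dvd _ dvd_rfl)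
          rw [this]
          congr 1
          rw [← pow_succ]
          congr 1
          omega
        rw [hmod, List.range_succ, List.map_append]
        simp

theorem solve_eq_alt (arr : List Int) : solve arr = solve_alt arr := by
  unfold solve solve_alt
  dsimp only
  set s := PySem.List.sorted arr (fun x => x) with hs
  by_cases hn : s.length = 0
  · -- empty list
    rw [hn]
    norm_num [PySem.List.pyRange, PySem.Int.mod]
  · have hn1 : 1 ≤ s.length := Nat.one_le_iff_ne_zero.mpr hn
    rw [if_neg hn]
    set n := s.length with hnn
    -- A side: split the pair fold
    rw [PySem.List.foldl_prod_mk
      (fun a i => PySem.Int.mod (2 * a + PySem.List.pyGetD s i 0) 1000000007)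
      (fun a i => PySem.Int.mod (2 * a + PySem.List.pyGetD s ((n : Int) - 1 - i) 0) 1000000007)]
    rw [PySem.List.pyRange_zero_natCast n]
    simp only [List.foldl_map]
    have hM : (0:Int) < 1000000007 := by norm_num
    -- A's max accumulator
    have hmax : (List.range n).foldl
        (fun (a : Int) (j : Nat) => PySem.Int.mod (2 * a + PySem.List.pyGetD s ((n : Int) - 1 - (j : Int)) 0) 1000000007) 0
        = (∑ j ∈ Finset.range n, s.getD (n - 1 - j) 0 * 2 ^ (n - 1 - j)) % 1000000007 := by
      have e1 := PySem.List.foldl_congr_mem (List.range n)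
        (fun (a : Int) (j : Nat) => PySem.Int.mod (2 * a + PySem.List.pyGetD s ((n : Int) - 1 - (j : Int)) 0) 1000000007)
        (fun (a : Int) (j : Nat) => (2 * a + s.getD (n - 1 - j) 0) % 1000000007) 0
        (by
          intro a j hj
          have hjn : j < n := List.mem_range.mp hj
          have hi : ((n : Int) - 1 - (j : Int)) = ((n - 1 - j : Nat) : Int) := by omega
          simp only [hi, PySem.List.pyGetD_natCast, PySem.Int.mod_eq_emod_of_pos hM])
      rw [e1, pv_horner_mod, pv_horner_closed]
    -- A's min accumulator
    have hmin : (List.range n).foldl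
        (fun (a : Int) (j : Nat) => PySem.Int.mod (2 * a + PySem.List.pyGetD s (j : Int) 0) 1000000007) 0
        = (∑ j ∈ Finset.range n, s.getD j 0 * 2 ^ (n - 1 - j)) % 1000000007 := by
      have e1 := PySem.List.foldl_congr_mem (List.range n)
        (fun (a : Int) (j : Nat) => PySem.Int.mod (2 * a + PySem.List.pyGetD s (j : Int) 0) 1000000007)
        (fun (a : Int) (j : Nat) => (2 * a + s.getD j 0) % 1000000007) 0
        (by
          intro a j hj
          simp only [PySem.List.pyGetD_natCast, PySem.Int.mod_eq_emod_of_pos hM])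
      rw [e1, pv_horner_mod, pv_horner_closed]
    rw [hmax, hmin]
    -- B's power table
    have hpw := pv_powtable n hn1
    dsimp only at hpw
    rw [hpw]
    -- B's total accumulator
    have htot : (List.range n).foldl
        (fun (a : Int) (j : Nat) => PySem.Int.mod
          (a + PySem.List.pyGetD s (j : Int) 0 *
            (PySem.List.pyGetD ((List.range n).map (fun k => (2 : Int) ^ k % 1000000007)) (j : Int) 0 -
             PySem.List.pyGetD ((List.range n).map (fun k => (2 : Int) ^ k % 1000000007)) ((n : Int) - 1 - (j : Int)) 0))
          1000000007) 0
        = (∑ j ∈ Finset.range n,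
            s.getD j 0 * ((2 : Int) ^ j % 1000000007 - (2 : Int) ^ (n - 1 - j) % 1000000007)) % 1000000007 := by
      have e1 := PySem.List.foldl_congr_mem (List.range n)
        (fun (a : Int) (j : Nat) => PySem.Int.mod
          (a + PySem.List.pyGetD s (j : Int) 0 *
            (PySem.List.pyGetD ((List.range n).map (fun k => (2 : Int) ^ k % 1000000007)) (j : Int) 0 -
             PySem.List.pyGetD ((List.range n).map (fun k => (2 : Int) ^ k % 1000000007)) ((n : Int) - 1 - (j : Int)) 0))
          1000000007)
        (fun (a : Int) (j : Nat) =>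
          (a + s.getD j 0 * ((2 : Int) ^ j % 1000000007 - (2 : Int) ^ (n - 1 - j) % 1000000007)) % 1000000007) 0
        (by
          intro a j hj
          have hjn : j < n := List.mem_range.mp hj
          have hi : ((n : Int) - 1 - (j : Int)) = ((n - 1 - j : Nat) : Int) := by omega
          simp only [hi, PySem.List.pyGetD_natCast, PySem.Int.mod_eq_emod_of_pos hM,
            PySem.List.getD_map_range _ _ _ _ hjn,
            PySem.List.getD_map_range _ _ _ _ (by omega : n - 1 - j < n)])
      rw [e1, pv_addfold_mod]
    rw [htot]
    -- final arithmetic, all mod 1000000007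
    rw [PySem.Int.mod_eq_emod_of_pos hM, PySem.Int.mod_eq_emod_of_pos hM]
    rw [Finset.sum_range_reflect (fun j => s.getD j 0 * 2 ^ j) n]
    set X : Int := ∑ j ∈ Finset.range n, s.getD j 0 * 2 ^ j with hX
    set Y : Int := ∑ j ∈ Finset.range n, s.getD j 0 * 2 ^ (n - 1 - j) with hY
    have hL : (X % 1000000007 - Y % 1000000007 + 1000000007) % 1000000007
        = (X - Y) % 1000000007 := by
      rw [Int.add_emod_right, ← Int.sub_emod]
    rw [hL, Int.emod_emod_of_dvd _ dvd_rfl]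
    have hterm : ∀ j ∈ Finset.range n,
        (s.getD j 0 * ((2 : Int) ^ j % 1000000007 - (2 : Int) ^ (n - 1 - j) % 1000000007)) % 1000000007
        = (s.getD j 0 * ((2 : Int) ^ j - (2 : Int) ^ (n - 1 - j))) % 1000000007 := by
      intro j _
      exact Int.ModEq.mul_left _ (Int.ModEq.sub (Int.emod_emod_of_dvd _ dvd_rfl)
        (Int.emod_emod_of_dvd _ dvd_rfl))
    rw [Finset.sum_int_mod, Finset.sum_congr rfl hterm, ← Finset.sum_int_mod]
    congr 1
    simp only [mul_sub, Finset.sum_sub_distrib, hX, hY]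


-- ===== VERDICT (by name: the statement is the Claim_ definition above) =====
theorem solve_spec : Claim_equal_solve := by
  intro arr _
  unfold Spec_solve
  exact solve_eq_alt arr
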